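-- pv_equiv track=rewrite | github.com/lizhiwen345-max/haiguan | synonym_file_bert.py | merge_duplicate_outputs
-- ===== SOURCE A (Python) =====
-- def merge_duplicate_outputs(result, param_fres):
--     if not result:
--         return result
--
--     content_to_keys = {}
--     for key, vals in result.items():
--         if not isinstance(vals, list):
--             vals = []
--         # 使用排序后的元组作为key，只合并完全相同的列表
--         vals_key = tuple(sorted(vals))
--
--         if vals_key in content_to_keys:
--             content_to_keys[vals_key].append(key)
--         else:
--             content_to_keys[vals_key] = [key]
--
--     # 重新构建结果
--     new_result = {}
--     for vals_tuple, keys in content_to_keys.items():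
--         vals_list = list(vals_tuple)
--
--         if len(keys) == 1:
--             # 只有一个key，直接保留
--             new_result[keys[0]] = vals_list
--         else:
--             # 多个key有相同的同义词列表，选择频率最高的作为主词
--             best_key = keys[0]
--             best_freq = int(param_fres.get(best_key, 0))
--             for k in keys[1:]:
--                 freq = int(param_fres.get(k, 0))
--                 if freq > best_freq:
--                     best_freq = freq
--                     best_key = k
--
--             # 其他key加入同义词列表
--             all_synonyms = list(vals_list)
--             for k in keys:
--                 if k != best_key and k not in all_synonyms:
--                     all_synonyms.append(k)
--
--             # 按频率排序
--             all_synonyms.sort(key=lambda x: int(param_fres.get(x, 0)), reverse=True)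
--             new_result[best_key] = all_synonyms
--
--     return new_result
-- ===== SOURCE B (Python) =====
-- def merge_duplicate_outputs(result, param_fres):
--     if not result:
--         return result
--
--     def freq(k):
--         return int(param_fres.get(k, 0))
--
--     tagged = [(tuple(sorted(vals if isinstance(vals, list) else [])), key)
--               for key, vals in result.items()]
--     pairs = []
--     for vk in dict.fromkeys(t for t, _ in tagged):
--         keys = [k for t, k in tagged if t == vk]
--         vals = list(vk)
--         if len(keys) == 1:
--             pairs.append((keys[0], vals))
--         else:
--             best = max(keys, key=freq)
--             syns = vals + [k for k in keys if k != best and k not in vals]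
--             pairs.append((best, sorted(syns, key=freq, reverse=True)))
--     return dict(pairs)
-- ===== Notes on version B (the rewrite author's own statement) =====
-- stated objective: alternative
-- what changed: B replaces A's hash-map accumulation (content_to_keys dict with append-or-insert) and its manual argmax and membership-growing loops by an ordered-dedup of the sorted-value tags plus a per-group filter, max(key=freq) and a list comprehension.
import Mathlib
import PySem

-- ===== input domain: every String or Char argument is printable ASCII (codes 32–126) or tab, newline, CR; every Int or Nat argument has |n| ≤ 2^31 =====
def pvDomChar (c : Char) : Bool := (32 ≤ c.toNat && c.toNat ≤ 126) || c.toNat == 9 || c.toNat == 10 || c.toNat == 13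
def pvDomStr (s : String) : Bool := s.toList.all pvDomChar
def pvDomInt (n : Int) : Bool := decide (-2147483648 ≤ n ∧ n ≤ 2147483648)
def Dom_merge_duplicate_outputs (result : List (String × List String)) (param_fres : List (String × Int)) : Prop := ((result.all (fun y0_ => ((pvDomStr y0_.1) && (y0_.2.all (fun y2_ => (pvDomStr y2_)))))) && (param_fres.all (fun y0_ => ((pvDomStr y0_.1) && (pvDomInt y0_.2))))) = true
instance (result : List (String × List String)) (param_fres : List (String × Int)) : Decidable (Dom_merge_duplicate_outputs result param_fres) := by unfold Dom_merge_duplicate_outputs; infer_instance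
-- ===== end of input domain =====

-- B replaces A's hash-map accumulation and manual argmax/membership loops by an
-- ordered-dedup-plus-filter grouping with max(key=…) and a list comprehension
-- (objective: alternative decomposition, same observable result).

-- ===== PORT A =====
def merge_duplicate_outputs (result : List (String × List String)) (param_fres : List (String × Int)) : List (String × List String) :=
  if result.isEmpty then result else
  let fres := PySem.Dict.ofList param_fres
  let content_to_keys : PySem.Dict (List String) (List String) :=
    (PySem.Dict.ofList result).items.foldl (fun d p =>
      let vals_key := PySem.List.sorted p.2 (fun x => x) false
      if d.contains vals_key then d.modify vals_key [] (fun l => l ++ [p.1])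
      else d.insert vals_key [p.1]) PySem.Dict.empty
  let new_result : PySem.Dict String (List String) :=
    content_to_keys.items.foldl (fun nr g =>
      let vals_list := g.1
      let keys := g.2
      if keys.length == 1 then nr.insert (keys.headD "") vals_list
      else
        let bk := keys.headD ""
        let best := (keys.drop 1).foldl (fun b k =>
            let f := fres.getD k 0
            if f > b.2 then (k, f) else b) (bk, fres.getD bk 0)
        let all_syn := keys.foldl (fun l k => if k ≠ best.1 ∧ k ∉ l then l ++ [k] else l) vals_list
        nr.insert best.1 (PySem.List.sorted all_syn (fun x => fres.getD x 0) true)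
      ) PySem.Dict.empty
  new_result.items

-- ===== PORT B =====
-- helper = the body of Source B's per-group branch (single key / max-frequency merge)
def pvGroup (fres : PySem.Dict String Int) (vk : List String) (keys : List String) : String × List String :=
  match keys with
  | [k] => (k, vk)
  | _ =>
    let best := PySem.List.maxD keys (fun k => fres.getD k 0) ""
    let syns := vk ++ keys.filter (fun k => decide (k ≠ best) && decide (k ∉ vk))
    (best, PySem.List.sorted syns (fun x => fres.getD x 0) true)

def merge_duplicate_outputs_alt (result : List (String × List String)) (param_fres : List (String × Int)) : List (String × List String) :=
  if result.isEmpty then result else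
  let fres := PySem.Dict.ofList param_fres
  let tagged := (PySem.Dict.ofList result).items.map
      (fun p => (PySem.List.sorted p.2 (fun x => x) false, p.1))
  let pairs := (PySem.List.dedup (tagged.map (fun q => q.1))).map
      (fun vk => pvGroup fres vk ((tagged.filter (fun q => q.1 == vk)).map (fun q => q.2)))
  (PySem.Dict.ofList pairs).items

-- ===== PRECONDITION & SPEC =====
def Spec_merge_duplicate_outputs (result : List (String × List String)) (param_fres : List (String × Int)) (out : List (String × List String)) : Prop := out = merge_duplicate_outputs_alt result param_fres
instance (result : List (String × List String)) (param_fres : List (String × Int)) (out : List (String × List String)) : Decidable (Spec_merge_duplicate_outputs result param_fres out) := by unfold Spec_merge_duplicate_outputs; infer_instance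

-- ===== CLAIM (what is proved, stated in full; the proofs are below) =====
def Claim_equal_merge_duplicate_outputs : Prop := ∀ (result : List (String × List String)) (param_fres : List (String × Int)), Dom_merge_duplicate_outputs result param_fres → Spec_merge_duplicate_outputs result param_fres (merge_duplicate_outputs result param_fres)

-- ===== LEMMAS AND PROOFS =====

-- A's keys[1:]-argmax with strict '>' over (key, freq) pairs = first maximal = max?/maxD
theorem pvMax?_cons (f : String → Int) (t : List String) (m : String) :
    PySem.List.max? (m :: t) f = some (t.foldl (fun m x => if f m < f x then x else m) m) := by
  induction t generalizing m with
  | nil => rfl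
  | cons k ks ih =>
    have h1 : PySem.List.max? (m :: k :: ks) f
        = PySem.List.max? ((if f m < f k then k else m) :: ks) f := by
      simp only [PySem.List.max?, List.foldl_cons]
      by_cases h : f m < f k <;> simp [h]
    rw [h1, ih]
    simp only [List.foldl_cons]

theorem pvBestEq (f : String → Int) (ks : List String) (m : String) :
    (ks.foldl (fun b k => if f k > b.2 then (k, f k) else b) (m, f m)).1
    = ks.foldl (fun m x => if f m < f x then x else m) m := by
  induction ks generalizing m with
  | nil => rfl
  | cons k t ih =>
    simp only [List.foldl_cons]
    by_cases h : f m < f k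
    · simpa [h, gt_iff_lt] using ih k
    · simpa [h, gt_iff_lt] using ih m

theorem pvMaxD_cons (f : String → Int) (k0 : String) (t : List String) :
    PySem.List.maxD (k0 :: t) f "" = t.foldl (fun m x => if f m < f x then x else m) k0 := by
  simp only [PySem.List.maxD, pvMax?_cons]
  rfl

-- A's membership-growing append loop over a duplicate-free key list = one filter
theorem pvSynEq (best : String) (vk : List String) :
    ∀ (keys extra : List String), keys.Nodup → (∀ k ∈ keys, k ∉ extra) →
    keys.foldl (fun l k => if k ≠ best ∧ k ∉ l then l ++ [k] else l) (vk ++ extra)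
      = vk ++ extra ++ keys.filter (fun k => decide (k ≠ best) && decide (k ∉ vk)) := by
  intro keys
  induction keys with
  | nil => intro extra _ _; simp
  | cons k ks ih =>
    intro extra hnd hdis
    have hk_extra : k ∉ extra := hdis k (by simp)
    have hk_ks : k ∉ ks := (List.nodup_cons.mp hnd).1
    have hks : ks.Nodup := (List.nodup_cons.mp hnd).2
    simp only [List.foldl_cons]
    by_cases hc : k ≠ best ∧ k ∉ vk
    · have hmem : k ∉ vk ++ extra := by
        simp only [List.mem_append]
        rintro (h | h)
        · exact hc.2 h
        · exact hk_extra h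
      rw [if_pos ⟨hc.1, hmem⟩]
      have : vk ++ extra ++ [k] = vk ++ (extra ++ [k]) := by simp
      rw [this, ih (extra ++ [k]) hks (by
        intro j hj
        simp only [List.mem_append, List.mem_singleton]
        rintro (h | h)
        · exact hdis j (by simp [hj]) h
        · exact hk_ks (h ▸ hj))]
      simp [hc.1, hc.2]
    · have hcnd : ¬ (k ≠ best ∧ k ∉ vk ++ extra) := by
        rintro ⟨h1, h2⟩
        exact hc ⟨h1, fun h => h2 (by simp [h])⟩
      rw [if_neg hcnd]
      rw [ih extra hks (fun j hj => hdis j (by simp [hj]))]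
      rcases not_and_or.mp hc with h1 | h2
      · simp only [not_not, ne_eq] at h1
        simp [h1]
      · simp only [not_not] at h2
        simp [h2]

-- proof-side abbreviations for the shared grouping data
def pvTagged (result : List (String × List String)) : List (List String × String) :=
  (PySem.Dict.ofList result).items.map (fun p => (PySem.List.sorted p.2 (fun x => x) false, p.1))

def pvGKeys (result : List (String × List String)) (vk : List String) : List String :=
  ((pvTagged result).filter (fun q => q.1 == vk)).map (fun q => q.2)

-- the second components of the tagged list are the (duplicate-free) dict keys
theorem pvSndNodup (result : List (String × List String)) :
    ((pvTagged result).map (fun q => q.2)).Nodup := by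
  have h := PySem.Dict.nodup_keys_ofList (ν := List String) result
  simpa [pvTagged, List.map_map, Function.comp, PySem.Dict.keys] using h

theorem pvGKeysNodup (result : List (String × List String)) (vk : List String) :
    (pvGKeys result vk).Nodup := by
  have hsub : (pvGKeys result vk).Sublist ((pvTagged result).map (fun q => q.2)) := by
    unfold pvGKeys
    exact List.Sublist.map _ List.filter_sublist
  exact hsub.nodup (pvSndNodup result)

theorem pvGKeysNe (result : List (String × List String)) (vk : List String)
    (h : vk ∈ PySem.List.dedup ((pvTagged result).map (fun q => q.1))) :
    pvGKeys result vk ≠ [] := by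
  rw [PySem.List.dedup_eq_ofList, PySem.Set.mem_ofList, List.mem_map] at h
  obtain ⟨q, hq, hq1⟩ := h
  have : q.2 ∈ pvGKeys result vk := by
    unfold pvGKeys
    exact List.mem_map_of_mem (List.mem_filter.mpr ⟨hq, by simp [hq1]⟩)
  intro hnil
  rw [hnil] at this
  exact absurd this (List.not_mem_nil)

-- A's first loop builds exactly the dedup-and-filter grouping of B
theorem pvCtkItems (result : List (String × List String)) :
    ((PySem.Dict.ofList result).items.foldl (fun d p =>
        let vals_key := PySem.List.sorted p.2 (fun x => x) false
        if d.contains vals_key then d.modify vals_key [] (fun l => l ++ [p.1])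
        else d.insert vals_key [p.1])
      (PySem.Dict.empty : PySem.Dict (List String) (List String))).items
    = (PySem.List.dedup ((pvTagged result).map (fun q => q.1))).map
        (fun vk => (vk, pvGKeys result vk)) := by
  have h1 : ((PySem.Dict.ofList result).items.foldl (fun d p =>
        let vals_key := PySem.List.sorted p.2 (fun x => x) false
        if d.contains vals_key then d.modify vals_key [] (fun l => l ++ [p.1])
        else d.insert vals_key [p.1])
      (PySem.Dict.empty : PySem.Dict (List String) (List String)))
      = (pvTagged result).foldl (fun d q => d.modify q.1 [] (fun l => l ++ [q.2])) PySem.Dict.empty := by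
    unfold pvTagged
    rw [List.foldl_map]
    apply PySem.List.foldl_congr_mem
    intro d p _
    by_cases hc : d.contains (PySem.List.sorted p.2 (fun x => x) false) = true
    · simp [hc]
    · simp only [Bool.not_eq_true] at hc
      simp [hc, PySem.Dict.modify, PySem.Dict.getD_of_not_contains _ _ hc]
  rw [h1]
  have hkeys : ((pvTagged result).foldl (fun d q => d.modify q.1 [] (fun l => l ++ [q.2]))
      (PySem.Dict.empty : PySem.Dict (List String) (List String))).keys
      = PySem.List.dedup ((pvTagged result).map (fun q => q.1)) := by
    rw [PySem.Dict.keys_foldl_modify_key (pvTagged result) (fun q => q.1) []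
      (fun _ q => fun l => l ++ [q.2]) PySem.Dict.empty]
    rw [PySem.List.dedup_eq_ofList]
    rfl
  have hnd : ((pvTagged result).foldl (fun d q => d.modify q.1 [] (fun l => l ++ [q.2]))
      (PySem.Dict.empty : PySem.Dict (List String) (List String))).keys.Nodup := by
    apply PySem.Dict.nodup_keys_foldl_modify_key
    simp
  rw [PySem.Dict.items_eq_map_keys _ hnd [], hkeys]
  apply List.map_congr_left
  intro vk _
  rw [PySem.Dict.getD_foldl_modify_append (pvTagged result) PySem.Dict.empty vk]
  unfold pvGKeys
  simp

-- the merged key of a group is one of the group's keys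
theorem pvGroupKeyMem (fres : PySem.Dict String Int) (vk : List String) (keys : List String)
    (hne : keys ≠ []) : (pvGroup fres vk keys).1 ∈ keys := by
  match keys, hne with
  | [k], _ => simp [pvGroup]
  | k0 :: k1 :: ks, _ =>
    show (pvGroup fres vk (k0 :: k1 :: ks)).1 ∈ k0 :: k1 :: ks
    cases hm : PySem.List.max? (k0 :: k1 :: ks) (fun k => fres.getD k 0) with
    | none =>
      exact absurd ((PySem.List.max?_eq_none_iff _ _).mp hm) (by simp)
    | some m =>
      have hmem := PySem.List.max?_mem hm
      simp only [pvGroup, PySem.List.maxD, hm, Option.getD_some]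
      exact hmem

-- A's second-loop body = insertion of B's per-group pair
theorem pvGroupBody (fres : PySem.Dict String Int) (vk : List String) (keys : List String)
    (hne : keys ≠ []) (hnd : keys.Nodup) (nr : PySem.Dict String (List String)) :
    (if keys.length == 1 then nr.insert (keys.headD "") vk
     else
       let bk := keys.headD ""
       let best := (keys.drop 1).foldl (fun b k =>
           let f := fres.getD k 0
           if f > b.2 then (k, f) else b) (bk, fres.getD bk 0)
       let all_syn := keys.foldl (fun l k => if k ≠ best.1 ∧ k ∉ l then l ++ [k] else l) vk
       nr.insert best.1 (PySem.List.sorted all_syn (fun x => fres.getD x 0) true))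
    = nr.insert (pvGroup fres vk keys).1 (pvGroup fres vk keys).2 := by
  match keys, hne with
  | [k], _ => simp [pvGroup]
  | k0 :: k1 :: ks, _ =>
    have hnd' : (k0 :: k1 :: ks).Nodup := hnd
    have hlen : ((k0 :: k1 :: ks).length == 1) = false := by simp
    have hbest : ((k1 :: ks).foldl (fun b k =>
        let f := fres.getD k 0
        if f > b.2 then (k, f) else b) (k0, fres.getD k0 0)).1
        = PySem.List.maxD (k0 :: k1 :: ks) (fun k => fres.getD k 0) "" := by
      rw [pvMaxD_cons]
      exact pvBestEq (fun k => fres.getD k 0) (k1 :: ks) k0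
    have hsyn : ∀ best : String,
        (k0 :: k1 :: ks).foldl (fun l k => if k ≠ best ∧ k ∉ l then l ++ [k] else l) vk
        = vk ++ (k0 :: k1 :: ks).filter (fun k => decide (k ≠ best) && decide (k ∉ vk)) := by
      intro best
      have h := pvSynEq best vk (k0 :: k1 :: ks) [] hnd' (by simp)
      simpa using h
    simp only [hlen, Bool.false_eq_true, if_false, List.headD_cons, List.drop_succ_cons,
      List.drop_zero]
    simp only [hbest]
    rw [hsyn]
    rfl

-- the merged keys of the distinct groups are pairwise distinct
theorem pvBestNodup (result : List (String × List String)) (fres : PySem.Dict String Int) :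
    ((PySem.List.dedup ((pvTagged result).map (fun q => q.1))).map
      (fun vk => (pvGroup fres vk (pvGKeys result vk)).1)).Nodup := by
  have hS : (PySem.List.dedup ((pvTagged result).map (fun q => q.1))).Nodup := by
    rw [PySem.List.dedup_eq_ofList]
    exact PySem.Set.nodup_ofList _
  apply List.Nodup.map_on ?_ hS
  intro vk hvk vk' hvk' heq
  have h1 := pvGroupKeyMem fres vk (pvGKeys result vk) (pvGKeysNe result vk hvk)
  have h2 := pvGroupKeyMem fres vk' (pvGKeys result vk') (pvGKeysNe result vk' hvk')
  unfold pvGKeys at h1 h2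
  rw [List.mem_map] at h1 h2
  obtain ⟨q, hq, hq2⟩ := h1
  obtain ⟨q', hq', hq2'⟩ := h2
  rw [List.mem_filter] at hq hq'
  have hqt : q.1 = vk := by simpa using hq.2
  have hqt' : q'.1 = vk' := by simpa using hq'.2
  have hsnd : q.2 = q'.2 := by rw [hq2, hq2']; exact heq
  have hqq := List.inj_on_of_nodup_map (pvSndNodup result) hq.1 hq'.1 hsnd
  rw [← hqt, ← hqt', hqq]

-- ===== VERDICT (by name: the statement is the Claim_ definition above) =====
theorem merge_duplicate_outputs_spec : Claim_equal_merge_duplicate_outputs := by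
  intro result param_fres _
  unfold Spec_merge_duplicate_outputs merge_duplicate_outputs merge_duplicate_outputs_alt
  by_cases h : result.isEmpty
  · simp [h]
  · rw [if_neg h, if_neg h]
    trans ((PySem.List.dedup ((pvTagged result).map (fun q => q.1))).map
      (fun vk => pvGroup (PySem.Dict.ofList param_fres) vk (pvGKeys result vk)))
    · -- A's else-branch computes the canonical group list
      simp only [pvCtkItems]
      rw [PySem.List.foldl_congr_mem _ _
        (fun (nr : PySem.Dict String (List String)) (g : List String × List String) =>
          nr.insert (pvGroup (PySem.Dict.ofList param_fres) g.1 g.2).1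
            (pvGroup (PySem.Dict.ofList param_fres) g.1 g.2).2) PySem.Dict.empty ?_]
      · rw [List.foldl_map]
        rw [PySem.Dict.items_foldl_insert_fresh _
          (fun vk => (pvGroup (PySem.Dict.ofList param_fres) vk (pvGKeys result vk)).1)
          (fun vk => (pvGroup (PySem.Dict.ofList param_fres) vk (pvGKeys result vk)).2)
          PySem.Dict.empty
          (fun a _ => PySem.Dict.contains_empty _)
          (pvBestNodup result (PySem.Dict.ofList param_fres))]
        simp [PySem.Dict.empty]
      · intro acc g hg
        rw [List.mem_map] at hg
        obtain ⟨vk, hvk, rfl⟩ := hg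
        exact pvGroupBody (PySem.Dict.ofList param_fres) vk (pvGKeys result vk)
          (pvGKeysNe result vk hvk) (pvGKeysNodup result vk) acc
    · -- B's else-branch is that list (fresh distinct keys: ofList keeps it as is)
      show (PySem.List.dedup ((pvTagged result).map (fun q => q.1))).map
          (fun vk => pvGroup (PySem.Dict.ofList param_fres) vk (pvGKeys result vk))
        = (PySem.Dict.ofList ((PySem.List.dedup ((pvTagged result).map (fun q => q.1))).map
          (fun vk => pvGroup (PySem.Dict.ofList param_fres) vk (pvGKeys result vk)))).items
      symm
      simp only [PySem.Dict.ofList, PySem.Dict.update]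
      rw [PySem.Dict.items_foldl_insert_fresh _ (fun p : String × List String => p.1)
        (fun p : String × List String => p.2)
        PySem.Dict.empty (fun a _ => PySem.Dict.contains_empty _) ?_]
      · simp [PySem.Dict.empty]
      · rw [List.map_map]
        exact pvBestNodup result (PySem.Dict.ofList param_fres)
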